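-- pv_equiv track=rewrite | github.com/cpicard443/Algorithme-Prepa | recherche_motif.py | construit_automate
-- ===== SOURCE A (Python) =====
-- def construit_automate(motif): # ne fonctionne pas... besoin de KMP ?
-- 	n = len(motif)
-- 	automate = [ [ [False]*(n+1),[False]*(n+1) ] for i in range(n+1)]
-- 	automate[0][0][0] = True
-- 	automate[0][1][0] = True
-- 	for i in range(n):
-- 		if motif[i]=="P":
-- 			automate[i][0][i+1] = True
-- 		else:
-- 			automate[i][1][i+1] = True
-- 	automate[n][0][n] = True
-- 	automate[n][1][n] = True
-- 	return automate
-- ===== SOURCE B (Python) =====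
-- # B: builds the whole table directly with a nested comprehension from a cell predicate,
-- # instead of allocating an all-False table and patching entries afterwards.
-- def construit_automate(motif):
--     n = len(motif)
--     def cell(i, b, j):
--         if i == 0 and j == 0:
--             return True
--         if i == n and j == n:
--             return True
--         return i < n and j == i + 1 and (motif[i] == 'P') == (b == 0)
--     return [[[cell(i, b, j) for j in range(n + 1)] for b in (0, 1)] for i in range(n + 1)]
-- ===== Notes on version B (the rewrite author's own statement) =====
-- stated objective: simpler
-- what changed: B computes each table entry directly from a closed-form cell predicate inside one nested comprehension, instead of A's allocate-all-False-then-patch sequence of index assignments.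
import Mathlib
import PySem

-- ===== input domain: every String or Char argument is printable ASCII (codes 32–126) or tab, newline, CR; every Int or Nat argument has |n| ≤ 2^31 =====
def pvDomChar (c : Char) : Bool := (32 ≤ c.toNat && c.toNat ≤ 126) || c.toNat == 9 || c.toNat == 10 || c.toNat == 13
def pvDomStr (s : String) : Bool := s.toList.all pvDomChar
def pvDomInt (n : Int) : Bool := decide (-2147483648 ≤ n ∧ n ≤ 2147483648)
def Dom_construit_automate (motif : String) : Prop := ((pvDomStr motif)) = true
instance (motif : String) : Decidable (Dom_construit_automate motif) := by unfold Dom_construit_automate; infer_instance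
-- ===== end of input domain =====

-- B builds the table directly from a closed-form cell predicate (one nested comprehension)
-- instead of A's allocate-all-False-then-patch index assignments; objective: simpler.

-- ===== PORT A =====
-- automate[i][b][j] = True  (Python list index assignment; indices always in range here)
def pvSetCell (a : List (List (List Bool))) (i b j : Nat) : List (List (List Bool)) :=
  a.modify i (fun row => row.modify b (fun ch => ch.set j true))

-- the body of A's `for i in range(n)` loop
def pvStep (l : List Char) (a : List (List (List Bool))) (i : Nat) : List (List (List Bool)) :=
  if l.getD i ' ' = 'P' then pvSetCell a i 0 (i+1) else pvSetCell a i 1 (i+1)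

def construit_automate (motif : String) : List (List (List Bool)) :=
  let l := motif.toList
  let n := l.length
  let a0 := (List.range (n+1)).map
      (fun _ => [List.replicate (n+1) false, List.replicate (n+1) false])
  let a1 := pvSetCell a0 0 0 0
  let a2 := pvSetCell a1 0 1 0
  let a3 := (List.range n).foldl (pvStep l) a2
  pvSetCell (pvSetCell a3 n 0 n) n 1 n

-- ===== PORT B =====
def pvCell (l : List Char) (n i b j : Nat) : Bool :=
  if i = 0 ∧ j = 0 then true
  else if i = n ∧ j = n then true
  else decide (i < n ∧ j = i + 1 ∧ ((l.getD i ' ' = 'P') ↔ b = 0))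

def construit_automate_alt (motif : String) : List (List (List Bool)) :=
  let l := motif.toList
  let n := l.length
  (List.range (n+1)).map (fun i =>
    [0, 1].map (fun b => (List.range (n+1)).map (fun j => pvCell l n i b j)))

-- ===== PRECONDITION & SPEC =====
def Spec_construit_automate (motif : String) (out : List (List (List Bool))) : Prop := out = construit_automate_alt motif
instance (motif : String) (out : List (List (List Bool))) : Decidable (Spec_construit_automate motif out) := by unfold Spec_construit_automate; infer_instance

-- ===== CLAIM (what is proved, stated in full; the proofs are below) =====
def Claim_equal_construit_automate : Prop := ∀ (motif : String), Dom_construit_automate motif → Spec_construit_automate motif (construit_automate motif)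

-- ===== LEMMAS AND PROOFS =====

-- read a cell with defaults (out-of-range reads give [], [], false)
def pvGetCell (a : List (List (List Bool))) (i b j : Nat) : Bool :=
  ((a.getD i []).getD b []).getD j false

-- closed form for A's finished table, entrywise
def pvACell (l : List Char) (i b j : Nat) : Bool :=
  if i = l.length ∧ b = 1 ∧ j = l.length then true
  else if i = l.length ∧ b = 0 ∧ j = l.length then true
  else if i < l.length ∧ j = i + 1 ∧ b = (if l.getD i ' ' = 'P' then 0 else 1) then true
  else if i = 0 ∧ b = 1 ∧ j = 0 then true
  else if i = 0 ∧ b = 0 ∧ j = 0 then true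
  else false

def pvShape (n : Nat) (a : List (List (List Bool))) : Prop :=
  a.length = n+1 ∧ (∀ i, i < n+1 → (a.getD i []).length = 2) ∧
  (∀ i b, i < n+1 → b < 2 → ((a.getD i []).getD b []).length = n+1)

theorem pvGetD_modify {α : Type} (xs : List α) (i k : Nat) (f : α → α) (d : α) :
    (xs.modify i f).getD k d = if k = i ∧ i < xs.length then f (xs.getD k d) else xs.getD k d := by
  simp only [List.getD_eq_getElem?_getD, List.getElem?_modify]
  rcases Nat.lt_or_ge k xs.length with h | h
  · by_cases hik : k = i
    · subst hik; simp [h]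
    · have h2 : ¬ i = k := fun e => hik e.symm
      simp [List.getElem?_eq_getElem h, h2, hik]
  · have hn : ¬(k = i ∧ i < xs.length) := by rintro ⟨rfl, h2⟩; omega
    simp [List.getElem?_eq_none h, hn]

theorem pvGetD_set {α : Type} (xs : List α) (i k : Nat) (v d : α) :
    (xs.set i v).getD k d = if k = i ∧ i < xs.length then v else xs.getD k d := by
  simp only [List.getD_eq_getElem?_getD, List.getElem?_set]
  rcases Nat.lt_or_ge k xs.length with h | h
  · by_cases hik : k = i
    · subst hik; simp [h]
    · have h2 : ¬ i = k := fun e => hik e.symm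
      simp [h2, hik]
  · have hn : ¬(k = i ∧ i < xs.length) := by rintro ⟨rfl, h2⟩; omega
    by_cases hik : i = k
    · subst hik; simp [List.getElem?_eq_none h, hn, Nat.not_lt.mpr h]
    · simp [List.getElem?_eq_none h, hn, hik]

theorem pvGetD_map_range {α : Type} (f : Nat → α) (m i : Nat) (d : α) :
    ((List.range m).map f).getD i d = if i < m then f i else d := by
  simp only [List.getD_eq_getElem?_getD, List.getElem?_map, List.getElem?_range]
  rcases Nat.lt_or_ge i m with h | h
  · simp [h]
  · simp [Nat.not_lt.mpr h]

theorem pvEqHelper {α : Type} (d : α) (xs ys : List α) (hlen : xs.length = ys.length)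
    (h : ∀ i, i < xs.length → xs.getD i d = ys.getD i d) : xs = ys := by
  apply List.ext_getElem hlen
  intro i h1 h2
  have hh := h i h1
  rwa [List.getD_eq_getElem?_getD, List.getD_eq_getElem?_getD,
    List.getElem?_eq_getElem h1, List.getElem?_eq_getElem h2] at hh

theorem pvShape_setCell {n : Nat} {a : List (List (List Bool))} (h : pvShape n a)
    (i b j : Nat) : pvShape n (pvSetCell a i b j) := by
  obtain ⟨hl, hr, hc⟩ := h
  refine ⟨by simp [pvSetCell, hl], ?_, ?_⟩
  · intro i' hi'
    unfold pvSetCell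
    rw [pvGetD_modify]
    split_ifs with h1
    · simp only [List.length_modify]
      exact hr i' hi'
    · exact hr i' hi'
  · intro i' b' hi' hb'
    unfold pvSetCell
    rw [pvGetD_modify]
    split_ifs with h1
    · beta_reduce
      rw [pvGetD_modify]
      split_ifs with h2
      · simp only [List.length_set]
        exact hc i' b' hi' hb'
      · exact hc i' b' hi' hb'
    · exact hc i' b' hi' hb'

theorem pvGetCell_setCell {n : Nat} {a : List (List (List Bool))} (h : pvShape n a)
    {i b j : Nat} (hi : i < n+1) (hb : b < 2) (hj : j < n+1) (i' b' j' : Nat) :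
    pvGetCell (pvSetCell a i b j) i' b' j' =
      if i' = i ∧ b' = b ∧ j' = j then true else pvGetCell a i' b' j' := by
  obtain ⟨hl, hr, hc⟩ := h
  unfold pvGetCell pvSetCell
  rw [pvGetD_modify]
  by_cases hii : i' = i
  · subst hii
    rw [if_pos ⟨rfl, by omega⟩]
    beta_reduce
    rw [pvGetD_modify]
    by_cases hbb : b' = b
    · subst hbb
      rw [if_pos ⟨rfl, by rw [hr i' hi]; omega⟩]
      beta_reduce
      rw [pvGetD_set]
      by_cases hjj : j' = j
      · subst hjj
        rw [if_pos ⟨rfl, by rw [hc i' b' hi hb]; omega⟩]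
        simp
      · rw [if_neg (by tauto), if_neg (by tauto)]
    · rw [if_neg (by tauto), if_neg (by tauto)]
  · rw [if_neg (by tauto), if_neg (by tauto)]

theorem pvShape_base (n : Nat) :
    pvShape n ((List.range (n+1)).map
      (fun _ => [List.replicate (n+1) false, List.replicate (n+1) false])) := by
  refine ⟨by simp, ?_, ?_⟩
  · intro i hi
    simp [pvGetD_map_range, hi]
  · intro i b hi hb
    rw [pvGetD_map_range, if_pos hi]
    interval_cases b <;> simp

theorem pvGetCell_base (n i b j : Nat) :
    pvGetCell ((List.range (n+1)).map
      (fun _ => [List.replicate (n+1) false, List.replicate (n+1) false])) i b j = false := by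
  unfold pvGetCell
  rw [pvGetD_map_range]
  rcases Nat.lt_or_ge i (n+1) with hi | hi
  · rw [if_pos hi]
    rcases b with _ | _ | b <;> simp [List.getD]
  · rw [if_neg (Nat.not_lt.mpr hi)]
    simp

theorem pvFold_shape (l : List Char) (n : Nat) (hn : n = l.length) (m : Nat) (hm : m ≤ n)
    (a : List (List (List Bool))) (h : pvShape n a) :
    pvShape n ((List.range m).foldl (pvStep l) a) := by
  induction m generalizing a with
  | zero => simpa using h
  | succ m ih =>
      rw [List.range_succ, List.foldl_append, List.foldl_cons, List.foldl_nil]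
      have hsh := ih (by omega) a h
      by_cases hc : l.getD m ' ' = 'P'
      · rw [show pvStep l ((List.range m).foldl (pvStep l) a) m =
            pvSetCell ((List.range m).foldl (pvStep l) a) m 0 (m+1) from by unfold pvStep; rw [if_pos hc]]
        exact pvShape_setCell hsh _ _ _
      · rw [show pvStep l ((List.range m).foldl (pvStep l) a) m =
            pvSetCell ((List.range m).foldl (pvStep l) a) m 1 (m+1) from by unfold pvStep; rw [if_neg hc]]
        exact pvShape_setCell hsh _ _ _

theorem pvFold_getCell (l : List Char) (n : Nat) (hn : n = l.length) (m : Nat) (hm : m ≤ n)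
    (a : List (List (List Bool))) (h : pvShape n a) (i b j : Nat) :
    pvGetCell ((List.range m).foldl (pvStep l) a) i b j =
      if i < m ∧ j = i + 1 ∧ b = (if l.getD i ' ' = 'P' then 0 else 1) then true
      else pvGetCell a i b j := by
  induction m generalizing a with
  | zero => simp
  | succ m ih =>
      rw [List.range_succ, List.foldl_append, List.foldl_cons, List.foldl_nil]
      have hsh := pvFold_shape l n hn m (by omega) a h
      have hrec := ih (by omega) a h
      by_cases hc : l.getD m ' ' = 'P'
      · rw [show pvStep l ((List.range m).foldl (pvStep l) a) m =
            pvSetCell ((List.range m).foldl (pvStep l) a) m 0 (m+1) from by unfold pvStep; rw [if_pos hc]]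
        rw [pvGetCell_setCell hsh (by omega) (by omega) (by omega), hrec]
        by_cases him : i = m
        · subst him
          simp only [hc]
          split_ifs <;> simp_all <;> omega
        · split_ifs <;> simp_all <;> omega
      · rw [show pvStep l ((List.range m).foldl (pvStep l) a) m =
            pvSetCell ((List.range m).foldl (pvStep l) a) m 1 (m+1) from by unfold pvStep; rw [if_neg hc]]
        rw [pvGetCell_setCell hsh (by omega) (by omega) (by omega), hrec]
        by_cases him : i = m
        · subst him
          simp only [hc]
          split_ifs <;> simp_all <;> omega
        · split_ifs <;> simp_all <;> omega

-- the cell-level characterisation of A's finished table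
set_option maxHeartbeats 1000000 in
theorem pvA_getCell (motif : String) (i b j : Nat) :
    pvGetCell (construit_automate motif) i b j = pvACell motif.toList i b j := by
  simp only [construit_automate]
  have h0 := pvShape_base motif.toList.length
  have h1 := pvShape_setCell h0 0 0 0
  have h2 := pvShape_setCell h1 0 1 0
  have h3 := pvFold_shape motif.toList motif.toList.length rfl motif.toList.length
    (le_refl _) _ h2
  have e3 := pvShape_setCell h3 motif.toList.length 0 motif.toList.length
  rw [pvGetCell_setCell e3 (by omega) (by omega) (by omega),
      pvGetCell_setCell h3 (by omega) (by omega) (by omega),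
      pvFold_getCell motif.toList motif.toList.length rfl motif.toList.length (le_refl _) _ h2,
      pvGetCell_setCell h1 (by omega) (by omega) (by omega),
      pvGetCell_setCell h0 (by omega) (by omega) (by omega),
      pvGetCell_base]
  rfl

-- A's table has the right shape
theorem pvA_shape (motif : String) : pvShape motif.toList.length (construit_automate motif) := by
  simp only [construit_automate]
  have h0 := pvShape_base motif.toList.length
  have h2 := pvShape_setCell (pvShape_setCell h0 0 0 0) 0 1 0
  have h3 := pvFold_shape motif.toList motif.toList.length rfl motif.toList.length
    (le_refl _) _ h2
  exact pvShape_setCell (pvShape_setCell h3 _ 0 _) _ 1 _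

-- entrywise comparison of the two closed forms
theorem pvCell_eq (l : List Char) (i b j : Nat) (hb : b < 2) :
    pvACell l i b j = pvCell l l.length i b j := by
  unfold pvACell pvCell
  by_cases hp : l.getD i ' ' = 'P'
  · simp only [hp]
    interval_cases b
    · split_ifs <;> simp_all <;> omega
    · split_ifs <;> simp_all <;> omega
  · simp only [hp]
    interval_cases b
    · split_ifs <;> simp_all <;> omega
    · split_ifs <;> simp_all <;> omega

-- ===== VERDICT (by name: the statement is the Claim_ definition above) =====
set_option maxHeartbeats 1000000 in
theorem construit_automate_spec : Claim_equal_construit_automate := by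
  intro motif _
  unfold Spec_construit_automate
  obtain ⟨hA1, hA2, hA3⟩ := pvA_shape motif
  have hB : construit_automate_alt motif =
      (List.range (motif.toList.length+1)).map (fun i =>
        [0, 1].map (fun b => (List.range (motif.toList.length+1)).map
          (fun j => pvCell motif.toList motif.toList.length i b j))) := rfl
  rw [hB]
  apply pvEqHelper []
  · rw [hA1]; simp
  · intro i hi
    rw [hA1] at hi
    rw [pvGetD_map_range, if_pos hi]
    beta_reduce
    apply pvEqHelper []
    · rw [hA2 i hi]; simp
    · intro b hb
      rw [hA2 i hi] at hb
      simp only [List.map_cons, List.map_nil]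
      interval_cases b
      · simp only [List.getD_cons_zero]
        apply pvEqHelper false
        · rw [hA3 i 0 hi (by omega)]; simp
        · intro j hj
          rw [hA3 i 0 hi (by omega)] at hj
          rw [pvGetD_map_range, if_pos hj]
          beta_reduce
          exact (pvA_getCell motif i 0 j).trans (pvCell_eq motif.toList i 0 j (by omega))
      · simp only [List.getD_cons_succ, List.getD_cons_zero]
        apply pvEqHelper false
        · rw [hA3 i 1 hi (by omega)]; simp
        · intro j hj
          rw [hA3 i 1 hi (by omega)] at hj
          rw [pvGetD_map_range, if_pos hj]
          beta_reduce
          exact (pvA_getCell motif i 1 j).trans (pvCell_eq motif.toList i 1 j (by omega))
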